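-- pv_equiv track=rewrite | github.com/pauloALuis/LP | SeriesDeProblemas2/pb7.py | dict_gen2
-- ===== SOURCE A (Python) =====
-- def dict_gen2(s: str):
--     """
--     method that creates a dict depending on a string
--     @param s : string
--     @return a dict
--     """
--     s2 = ""
--     sum = 0
--     dict = {}
--     for i in range(len(s)):
--         if s[i] == " ":
--             dict.update({sum : s2})
--             sum = 0
--             s2 = ""
--         elif i == len(s) - 1:
--             sum += i
--             dict.update({sum : s2 + s[i]})
--         else:
--             s2 += s[i]
--             sum += i
--     return dict
-- ===== SOURCE B (Python) =====
-- def dict_gen2(s: str):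
--     """Same mapping as A, built from s.split(" ") with arithmetic index-sum keys."""
--     if not s:
--         return {}
--     words = s.split(" ")
--     if s[-1] == " ":
--         words.pop()
--     d = {}
--     pos = 0
--     for w in words:
--         d[sum(range(pos, pos + len(w)))] = w
--         pos += len(w) + 1
--     return d
-- ===== Notes on version B (the rewrite author's own statement) =====
-- stated objective: faster
-- what changed: B replaces A's per-character state machine (manual word buffer and running index-sum with reset-on-space) by s.split(" ") plus a running start position, computing each key arithmetically as sum(range(pos, pos+len(w))); the per-character Python-level work disappears into the C-level split.
import Mathlib
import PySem

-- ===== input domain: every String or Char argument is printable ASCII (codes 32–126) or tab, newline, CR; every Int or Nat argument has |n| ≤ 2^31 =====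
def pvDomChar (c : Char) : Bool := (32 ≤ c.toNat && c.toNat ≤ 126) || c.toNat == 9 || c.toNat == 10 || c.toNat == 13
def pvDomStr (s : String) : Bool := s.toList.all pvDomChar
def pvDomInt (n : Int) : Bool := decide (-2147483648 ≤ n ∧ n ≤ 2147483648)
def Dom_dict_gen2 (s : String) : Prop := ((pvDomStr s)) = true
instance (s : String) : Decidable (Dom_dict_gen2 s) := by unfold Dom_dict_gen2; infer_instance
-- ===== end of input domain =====

-- B rebuilds the dict from s.split(" ") with arithmetic index-sum keys instead of A's
-- per-character state machine; same return value, proved below (no mutation is observable).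

-- ===== PORT A =====
-- A's loop body: state (s2, sum, dict); branch on s[i] == " " / i == len(s)-1
def astep (cs : List Char) (n : Int) (st : List Char × Int × PySem.Dict Int (List Char))
    (i : Int) : List Char × Int × PySem.Dict Int (List Char) :=
  let c := PySem.List.pyGetD cs i ' '  -- s[i]: i ∈ range(len(s)) is always in range, so exact
  if c = ' ' then ([], 0, st.2.2.insert st.2.1 st.1)
  else if i = n - 1 then (st.1, st.2.1 + i, st.2.2.insert (st.2.1 + i) (st.1 ++ [c]))
  else (st.1 ++ [c], st.2.1 + i, st.2.2)

def dict_gen2 (s : String) : List (Int × String) :=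
  let cs := s.toList
  let n : Int := PySem.Str.len s
  let fin := (PySem.List.pyRange 0 n 1).foldl (astep cs n) ([], 0, PySem.Dict.empty)
  fin.2.2.items.map (fun p => (p.1, String.ofList p.2))

-- ===== PORT B =====
-- B's loop body: d[sum(range(pos, pos + len(w)))] = w; pos += len(w) + 1
def bstep (st : Int × PySem.Dict Int (List Char)) (w : List Char) :
    Int × PySem.Dict Int (List Char) :=
  (st.1 + (w.length : Int) + 1,
   st.2.insert ((PySem.List.pyRange st.1 (st.1 + (w.length : Int)) 1).sum) w)

def dict_gen2_alt (s : String) : List (Int × String) :=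
  let cs := s.toList
  if cs = [] then []  -- if not s: return {}
  else
    let ws0 := PySem.Chars.splitOn cs [' ']          -- s.split(" ")
    -- s[-1] == " " on a nonempty s is its last char; words.pop() drops the last element
    let ws := if cs.getLast? = some ' ' then ws0.dropLast else ws0
    let fin := ws.foldl bstep (0, PySem.Dict.empty)
    fin.2.items.map (fun p => (p.1, String.ofList p.2))

-- ===== PRECONDITION & SPEC =====
def Spec_dict_gen2 (s : String) (out : List (Int × String)) : Prop := out = dict_gen2_alt s
instance (s : String) (out : List (Int × String)) : Decidable (Spec_dict_gen2 s out) := by unfold Spec_dict_gen2; infer_instance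

-- ===== CLAIM (what is proved, stated in full; the proofs are below) =====
def Claim_equal_dict_gen2 : Prop := ∀ (s : String), Dom_dict_gen2 s → Spec_dict_gen2 s (dict_gen2 s)

-- ===== LEMMAS AND PROOFS =====

-- A's loop, as structural recursion on the remaining characters (i is the global index;
-- "i == len(s)-1" becomes "rest = []").
def aloop : List Char → Int → List Char → Int → PySem.Dict Int (List Char) → PySem.Dict Int (List Char)
  | [], _, _, _, d => d
  | c :: rest, i, s2, sum, d =>
    if c = ' ' then aloop rest (i + 1) [] 0 (d.insert sum s2)
    else if rest = [] then d.insert (sum + i) (s2 ++ [c])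
    else aloop rest (i + 1) (s2 ++ [c]) (sum + i) d

-- split on a single space, accumulator-free reformulation of PySem.Chars.splitOn _ [' ']
def mySplit (cur : List Char) : List Char → List (List Char)
  | [] => [cur]
  | c :: rest => if c = ' ' then cur :: mySplit [] rest else mySplit (cur ++ [c]) rest

-- B's word list after the trim
def btrim (cs : List Char) : List (List Char) :=
  if cs = [] then []
  else if cs.getLast? = some ' ' then (mySplit [] cs).dropLast else mySplit [] cs

theorem mySplit_ne_nil (cur cs : List Char) : mySplit cur cs ≠ [] := by
  induction cs generalizing cur with
  | nil => simp [mySplit]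
  | cons c rest ih => by_cases h : c = ' ' <;> simp [mySplit, h, ih]


theorem splitOn_go_eq (l : List Char) : ∀ (f : Nat), l.length < f →
    ∀ (cur : List Char) (acc : List (List Char)),
    PySem.Chars.splitOn.go [' '] f l cur acc = acc.reverse ++ mySplit cur.reverse l := by
  induction l with
  | nil =>
    intro f hf cur acc
    match f, hf with
    | f + 1, _ => simp [PySem.Chars.splitOn.go, mySplit]
  | cons c rest ih =>
    intro f hf cur acc
    match f, hf with
    | f + 1, hf =>
      by_cases hc : c = ' '
      · subst hc
        simp only [PySem.Chars.splitOn.go, List.isPrefixOf, BEq.rfl, Bool.true_and, if_pos]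
        rw [show List.drop [' '].length (' ' :: rest) = rest from rfl]
        rw [ih f (by simpa using hf) [] (cur.reverse :: acc)]
        simp [mySplit]
      · have hpre : [' '].isPrefixOf (c :: rest) = false := by
          simp [List.isPrefixOf]
          exact fun h => (hc h.symm).elim
        simp only [PySem.Chars.splitOn.go, hpre, Bool.false_eq_true, if_false]
        rw [ih f (by simpa using hf) (c :: cur) acc]
        simp [mySplit, hc]

theorem splitOn_eq_mySplit (cs : List Char) : PySem.Chars.splitOn cs [' '] = mySplit [] cs := by
  rw [PySem.Chars.splitOn.eq_def, splitOn_go_eq cs (cs.length + 1) (by omega) [] []]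
  simp

-- A's foldl over range(len(s)) equals aloop on the suffix not yet processed
theorem foldA_aux (cs : List Char) (suf : List Char) :
    ∀ (pre s2 : List Char) (sum : Int) (d : PySem.Dict Int (List Char)), cs = pre ++ suf →
    ((PySem.List.pyRange (pre.length : Int) (cs.length : Int) 1).foldl
      (astep cs (cs.length : Int)) (s2, sum, d)).2.2
    = aloop suf (pre.length : Int) s2 sum d := by
  induction suf with
  | nil =>
    intro pre s2 sum d h
    have hlen : cs.length = pre.length := by rw [h]; simp
    rw [PySem.List.pyRange_one_eq_nil (by exact_mod_cast hlen.le)]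
    simp [aloop]
  | cons c rest ih =>
    intro pre s2 sum d h
    have hlen : cs.length = pre.length + rest.length + 1 := by rw [h]; simp; omega
    have hlt : (pre.length : Int) < (cs.length : Int) := by push_cast [hlen]; omega
    rw [PySem.List.pyRange_one_cons hlt]
    have hget : PySem.List.pyGetD cs (pre.length : Int) ' ' = c := by
      rw [PySem.List.pyGetD_natCast, h]
      simp [List.getD]
    simp only [List.foldl_cons, astep, hget]
    have hpre1 : ((pre ++ [c]).length : Int) = (pre.length : Int) + 1 := by simp
    by_cases hc : c = ' '
    · rw [if_pos hc]
      have := ih (pre ++ [c]) [] 0 (d.insert sum s2) (by rw [h, hc]; simp)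
      rw [hpre1] at this
      rw [this]
      simp [aloop, hc]
    · rw [if_neg hc]
      by_cases hrest : rest = []
      · have hlast : (pre.length : Int) = (cs.length : Int) - 1 := by
          have h0 : rest.length = 0 := by simp [hrest]
          push_cast [hlen, h0]; omega
        rw [if_pos hlast]
        rw [PySem.List.pyRange_one_eq_nil (by omega)]
        simp [aloop, hc, hrest]
      · have hlast : (pre.length : Int) ≠ (cs.length : Int) - 1 := by
          have : rest.length ≠ 0 := fun h0 => hrest (List.eq_nil_of_length_eq_zero h0)
          push_cast [hlen]; omega
        rw [if_neg hlast]
        have := ih (pre ++ [c]) (s2 ++ [c]) (sum + (pre.length : Int)) d (by rw [h]; simp)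
        rw [hpre1] at this
        rw [this]
        simp [aloop, hc, hrest]

-- processing one whole word followed by a space
theorem aloop_word_space (w : List Char) (hw : ' ' ∉ w) :
    ∀ (rest s2 : List Char) (i sum : Int) (d : PySem.Dict Int (List Char)),
    aloop (w ++ ' ' :: rest) i s2 sum d
      = aloop rest (i + (w.length : Int) + 1) [] 0
          (d.insert (sum + (PySem.List.pyRange i (i + (w.length : Int)) 1).sum) (s2 ++ w)) := by
  induction w with
  | nil =>
    intro rest s2 i sum d
    simp [aloop, PySem.List.pyRange_one_eq_nil (le_refl i)]
  | cons c w' ih =>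
    intro rest s2 i sum d
    have hc : c ≠ ' ' := fun h => hw (h ▸ List.mem_cons_self)
    have hr : ' ' ∉ w' := fun h => hw (List.mem_cons_of_mem _ h)
    have hcons : PySem.List.pyRange i (i + ((w'.length + 1 : Nat) : Int)) 1
        = i :: PySem.List.pyRange (i + 1) ((i + 1) + (w'.length : Int)) 1 := by
      rw [show (i + ((w'.length + 1 : Nat) : Int)) = i + 1 + (w'.length : Int) from by
        push_cast; ring]
      exact PySem.List.pyRange_one_cons (by omega)
    simp only [List.cons_append, aloop, hc, if_false, List.append_eq_nil_iff, reduceCtorEq,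
      and_false, List.length_cons]
    rw [ih hr, hcons, List.sum_cons]
    have e1 : i + ((w'.length + 1 : Nat) : Int) + 1 = i + 1 + (w'.length : Int) + 1 := by
      push_cast; ring
    have e2 : sum + (i + (PySem.List.pyRange (i + 1) (i + 1 + (w'.length : Int)) 1).sum)
        = sum + i + (PySem.List.pyRange (i + 1) (i + 1 + (w'.length : Int)) 1).sum := by ring
    have e3 : s2 ++ c :: w' = s2 ++ [c] ++ w' := by simp
    rw [e1, e2, e3]

-- processing a final word (no space after it)
theorem aloop_word_last (w : List Char) (hw : ' ' ∉ w) (hne : w ≠ []) :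
    ∀ (s2 : List Char) (i sum : Int) (d : PySem.Dict Int (List Char)),
    aloop w i s2 sum d
      = d.insert (sum + (PySem.List.pyRange i (i + (w.length : Int)) 1).sum) (s2 ++ w) := by
  induction w with
  | nil => exact absurd rfl hne
  | cons c w' ih =>
    intro s2 i sum d
    have hc : c ≠ ' ' := fun h => hw (h ▸ List.mem_cons_self)
    have hr : ' ' ∉ w' := fun h => hw (List.mem_cons_of_mem _ h)
    by_cases hw' : w' = []
    · subst hw'
      simp only [aloop, hc, if_false, List.length_cons, List.length_nil]
      have : PySem.List.pyRange i (i + ((0 + 1 : Nat) : Int)) 1 = [i] := by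
        have := PySem.List.pyRange_one_singleton i
        simp [this]
      rw [this]
      simp
    · have hcons : PySem.List.pyRange i (i + ((w'.length + 1 : Nat) : Int)) 1
          = i :: PySem.List.pyRange (i + 1) ((i + 1) + (w'.length : Int)) 1 := by
        rw [show (i + ((w'.length + 1 : Nat) : Int)) = i + 1 + (w'.length : Int) from by
          push_cast; ring]
        exact PySem.List.pyRange_one_cons (by omega)
      simp only [aloop, hc, if_false, if_neg hw', List.length_cons]
      rw [ih hr hw', hcons, List.sum_cons]
      have e2 : sum + (i + (PySem.List.pyRange (i + 1) (i + 1 + (w'.length : Int)) 1).sum)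
          = sum + i + (PySem.List.pyRange (i + 1) (i + 1 + (w'.length : Int)) 1).sum := by ring
      have e3 : s2 ++ c :: w' = s2 ++ [c] ++ w' := by simp
      rw [e2, e3]

theorem mySplit_no_space (w : List Char) (hw : ' ' ∉ w) : ∀ cur, mySplit cur w = [cur ++ w] := by
  induction w with
  | nil => simp [mySplit]
  | cons c rest ih =>
    intro cur
    have hc : c ≠ ' ' := fun h => hw (h ▸ List.mem_cons_self)
    have hr : ' ' ∉ rest := fun h => hw (List.mem_cons_of_mem _ h)
    simp [mySplit, hc, ih hr]

theorem mySplit_word (w : List Char) (hw : ' ' ∉ w) : ∀ (rest cur : List Char),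
    mySplit cur (w ++ ' ' :: rest) = (cur ++ w) :: mySplit [] rest := by
  induction w with
  | nil => intro rest cur; simp [mySplit]
  | cons c w' ih =>
    intro rest cur
    have hc : c ≠ ' ' := fun h => hw (h ▸ List.mem_cons_self)
    have hr : ' ' ∉ w' := fun h => hw (List.mem_cons_of_mem _ h)
    simp [mySplit, hc, ih hr]

-- the heart: A's recursive loop = B's fold over the trimmed word list
theorem btrim_word (w t : List Char) (hw : ' ' ∉ w) :
    btrim (w ++ ' ' :: t) = w :: btrim t := by
  have hsplit : mySplit [] (w ++ ' ' :: t) = w :: mySplit [] t := by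
    simp [mySplit_word w hw t []]
  by_cases ht : t = []
  · subst ht
    have hlast : (w ++ [' ']).getLast? = some ' ' := by simp
    simp [btrim, hsplit, hlast, mySplit]
  · have hlast : (w ++ ' ' :: t).getLast? = t.getLast? := by
      cases t with
      | nil => exact absurd rfl ht
      | cons c' t' =>
        rw [List.getLast?_append, List.getLast?_cons_cons]
        exact Option.or_of_isSome (by simp [List.getLast?_isSome])
    by_cases hsp : t.getLast? = some ' '
    · simp [btrim, hsplit, hlast, hsp, ht,
        List.dropLast_cons_of_ne_nil (mySplit_ne_nil [] t)]
    · simp [btrim, hsplit, hlast, hsp, ht]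

theorem main_loop (N : Nat) : ∀ (cs : List Char), cs.length ≤ N → ∀ (i : Int) (d : PySem.Dict Int (List Char)),
    aloop cs i [] 0 d = ((btrim cs).foldl bstep (i, d)).2 := by
  induction N with
  | zero =>
    intro cs hcs i d
    have : cs = [] := List.eq_nil_of_length_eq_zero (Nat.le_zero.mp hcs)
    subst this
    simp [aloop, btrim]
  | succ N ih =>
    intro cs hcs i d
    by_cases hnil : cs = []
    · subst hnil; simp [aloop, btrim]
    · set w := cs.takeWhile (fun c => c != ' ') with hwdef
      set r := cs.dropWhile (fun c => c != ' ') with hrdef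
      have hsplit : w ++ r = cs := List.takeWhile_append_dropWhile
      have hw : ' ' ∉ w := by
        intro hmem
        have := List.mem_takeWhile_imp hmem
        simp at this
      cases hr : r with
      | nil =>
        have hcw : cs = w := by rw [← hsplit, hr, List.append_nil]
        have hlast : cs.getLast? ≠ some ' ' := by
          intro hsome
          exact hw (hcw ▸ List.mem_of_getLast? hsome)
        rw [hcw] at hnil hlast ⊢
        rw [aloop_word_last w hw hnil, btrim]
        rw [if_neg hnil, if_neg hlast, mySplit_no_space w hw []]
        simp [bstep]
      | cons c t =>
        have hc : c = ' ' := by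
          have h1 : List.dropWhile (fun c => c != ' ') cs ≠ [] := by
            rw [← hrdef, hr]; simp
          have h2 := List.head_dropWhile_not (fun c => c != ' ') h1
          have h4 : (List.dropWhile (fun c => c != ' ') cs).head? = some c := by
            rw [← hrdef, hr]; rfl
          rw [List.head?_eq_some_head h1] at h4
          rw [Option.some.injEq] at h4
          rw [h4] at h2
          simpa using h2
        subst hc
        have hcw : cs = w ++ ' ' :: t := by rw [← hsplit, hr]
        have hlen : t.length ≤ N := by
          have : cs.length = w.length + 1 + t.length := by simp [hcw]; omega
          omega
        rw [hcw, aloop_word_space w hw, btrim_word w t hw]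
        rw [ih t hlen]
        simp only [List.foldl_cons]
        congr 1
        simp [bstep]

theorem dict_gen2_eq (s : String) : dict_gen2 s = dict_gen2_alt s := by
  have hA := foldA_aux s.toList s.toList [] [] 0 PySem.Dict.empty (by simp)
  simp only [List.length_nil, Nat.cast_zero] at hA
  simp only [dict_gen2, dict_gen2_alt, PySem.Str.len_eq]
  rw [hA, main_loop s.toList.length s.toList (le_refl _) 0 PySem.Dict.empty]
  by_cases hnil : s.toList = []
  · simp [hnil, btrim, PySem.Dict.empty]
  · simp [btrim, splitOn_eq_mySplit, hnil]

-- ===== VERDICT (by name: the statement is the Claim_ definition above) =====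
theorem dict_gen2_spec : Claim_equal_dict_gen2 := by
  intro s _
  exact dict_gen2_eq s
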